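-- pv_equiv track=rewrite | github.com/AbduElturki/advent_of_code_2019 | 12/main.py | calVelocity1D
-- ===== SOURCE A (Python) =====
-- from copy import deepcopy
--
-- def calVelocity1D(moons, lastVelocity):
--     returnVal = deepcopy(lastVelocity)
--     for i, moon in enumerate(moons):
--         for j, moonToCompare in enumerate(moons):
--             if i == j: continue
--             else:
--                 if moon < moonToCompare:
--                     returnVal[i] += 1
--                 elif moon > moonToCompare:
--                     returnVal[i] -=1
--     return returnVal
-- ===== SOURCE B (Python) =====
-- def calVelocity1D(moons, lastVelocity):
--     n = len(moons)
--     s = sorted(moons)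
--     lt = {}   # value -> count of strictly smaller positions (= index of first occurrence in s)
--     gt = {}   # value -> count of strictly larger positions (= n - 1 - index of last occurrence in s)
--     for idx, v in enumerate(s):
--         if v not in lt:
--             lt[v] = idx
--         gt[v] = n - idx - 1
--     out = list(lastVelocity)
--     for k, m in enumerate(moons):
--         out[k] += gt[m] - lt[m]
--     return out
-- ===== Notes on version B (the rewrite author's own statement) =====
-- stated objective: faster
-- what changed: Replaces the all-pairs O(n^2) comparison with one sort plus a single scan that records, per value, its first and last rank in the sorted order (= counts of strictly smaller / larger positions) in two dicts, then one pass applies gt[m]-lt[m] to each velocity.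
-- outside the precondition, e.g. on calVelocity1D([1, 1], []): A returns [], B raises IndexError
import Mathlib
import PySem

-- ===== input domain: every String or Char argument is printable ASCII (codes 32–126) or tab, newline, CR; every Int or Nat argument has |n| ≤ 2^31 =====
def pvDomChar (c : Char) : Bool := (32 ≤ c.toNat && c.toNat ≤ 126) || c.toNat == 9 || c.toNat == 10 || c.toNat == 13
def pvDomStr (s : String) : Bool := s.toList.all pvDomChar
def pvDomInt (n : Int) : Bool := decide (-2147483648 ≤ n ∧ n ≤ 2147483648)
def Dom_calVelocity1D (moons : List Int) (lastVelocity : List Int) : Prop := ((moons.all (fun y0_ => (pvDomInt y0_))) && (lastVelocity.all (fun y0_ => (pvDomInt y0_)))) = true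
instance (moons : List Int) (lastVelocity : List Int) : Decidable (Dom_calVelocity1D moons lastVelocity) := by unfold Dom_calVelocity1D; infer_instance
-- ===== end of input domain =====

-- B replaces A's all-pairs comparison by one sort plus a single rank scan; return-value equivalence (neither mutates its arguments).

-- ===== PORT A =====
def calVelocity1D (moons : List Int) (lastVelocity : List Int) : List Int :=
  (PySem.List.enumerate moons).foldl (fun returnVal im =>
    (PySem.List.enumerate moons).foldl (fun rv jx =>
      if im.1 == jx.1 then rv
      else if im.2 < jx.2 then PySem.List.pySetD rv im.1 (PySem.List.pyGetD rv im.1 0 + 1)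
      else if jx.2 < im.2 then PySem.List.pySetD rv im.1 (PySem.List.pyGetD rv im.1 0 - 1)
      else rv) returnVal) lastVelocity

-- ===== PORT B =====
def calVelocity1D_alt (moons : List Int) (lastVelocity : List Int) : List Int :=
  let n : Int := moons.length
  let s := PySem.List.sorted moons (fun x => x) false
  let p := (PySem.List.enumerate s).foldl
    (fun (p : PySem.Dict Int Int × PySem.Dict Int Int) iv =>
      (if p.1.contains iv.2 then p.1 else p.1.insert iv.2 iv.1,
       p.2.insert iv.2 (n - iv.1 - 1)))
    (PySem.Dict.empty, PySem.Dict.empty)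
  (PySem.List.enumerate moons).foldl
    (fun out km =>
      PySem.List.pySetD out km.1 (PySem.List.pyGetD out km.1 0 + (p.2.getD km.2 0 - p.1.getD km.2 0)))
    lastVelocity

-- ===== PRECONDITION & SPEC =====
-- Pre_ excludes inputs with fewer velocities than moons: there Python A raises IndexError except in the
-- accidental corner where all moons are equal (A then returns lastVelocity unchanged, never touching the
-- list), while B's natural per-index update raises IndexError on all of them.
def Pre_calVelocity1D (moons : List Int) (lastVelocity : List Int) : Prop :=
  moons.length ≤ lastVelocity.length
instance (moons : List Int) (lastVelocity : List Int) : Decidable (Pre_calVelocity1D moons lastVelocity) := by unfold Pre_calVelocity1D; infer_instance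
def pvWitness_calVelocity1D : List Int × List Int := ([3, 1, 2], [0, 0, 0])

def Spec_calVelocity1D (moons : List Int) (lastVelocity : List Int) (out : List Int) : Prop := out = calVelocity1D_alt moons lastVelocity
instance (moons : List Int) (lastVelocity : List Int) (out : List Int) : Decidable (Spec_calVelocity1D moons lastVelocity out) := by unfold Spec_calVelocity1D; infer_instance

-- ===== CLAIM (what is proved, stated in full; the proofs are below) =====
def Claim_equal_calVelocity1D : Prop := ∀ (moons : List Int) (lastVelocity : List Int), Dom_calVelocity1D moons lastVelocity → Pre_calVelocity1D moons lastVelocity → Spec_calVelocity1D moons lastVelocity (calVelocity1D moons lastVelocity)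

-- ===== LEMMAS AND PROOFS =====

-- net velocity change of a moon at position m: #strictly larger minus #strictly smaller positions
def pvDelta (moons : List Int) (m : Int) : Int :=
  (moons.countP (fun x => m < x) : Int) - (moons.countP (fun x => x < m) : Int)

-- setting an in-range index to its own value is the identity
lemma pv_set_self (rv : List Int) (i : Int) (h0 : 0 ≤ i) (h : i.toNat < rv.length) :
    PySem.List.pySetD rv i (PySem.List.pyGetD rv i 0) = rv := by
  rw [PySem.List.pySetD_of_nonneg _ _ h0, PySem.List.pyGetD_of_nonneg _ _ h0,
      List.getD_eq_getElem _ _ h, List.set_getElem_self]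

-- collapsing two writes at the same in-range index
lemma pv_set_set (rv : List Int) (i : Int) (a c : Int) (h0 : 0 ≤ i) (h : i.toNat < rv.length) :
    PySem.List.pySetD (PySem.List.pySetD rv i a) i
      (PySem.List.pyGetD (PySem.List.pySetD rv i a) i 0 + c)
    = PySem.List.pySetD rv i (a + c) := by
  simp only [PySem.List.pySetD_of_nonneg _ _ h0, PySem.List.pyGetD_of_nonneg _ _ h0]
  rw [List.getD_eq_getElem _ _ (by simpa using h), List.getElem_set_self, List.set_set]

-- A's inner loop over any pair list accumulates a signed count at index i
lemma pv_innerA (i m : Int) (h0 : 0 ≤ i) :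
    ∀ (el : List (Int × Int)) (rv : List Int), i.toNat < rv.length →
    el.foldl (fun rv jx =>
      if i == jx.1 then rv
      else if m < jx.2 then PySem.List.pySetD rv i (PySem.List.pyGetD rv i 0 + 1)
      else if jx.2 < m then PySem.List.pySetD rv i (PySem.List.pyGetD rv i 0 - 1)
      else rv) rv
    = PySem.List.pySetD rv i (PySem.List.pyGetD rv i 0 +
        (el.map (fun jx => if i == jx.1 then 0 else if m < jx.2 then 1 else if jx.2 < m then (-1 : Int) else 0)).sum) := by
  intro el
  induction el with
  | nil => intro rv h; simpa using (pv_set_self rv i h0 h).symm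
  | cons jx rest ih =>
    intro rv h
    simp only [List.foldl_cons, List.map_cons, List.sum_cons]
    by_cases h1 : i == jx.1
    · rw [if_pos h1, if_pos h1, ih rv h]; ring_nf
    · rw [if_neg h1, if_neg h1]
      by_cases h2 : m < jx.2
      · rw [if_pos h2, if_pos h2, ih _ (by simpa [PySem.List.length_pySetD] using h),
            pv_set_set rv i _ _ h0 h]
        ring_nf
      · rw [if_neg h2, if_neg h2]
        by_cases h3 : jx.2 < m
        · rw [if_pos h3, if_pos h3, ih _ (by simpa [PySem.List.length_pySetD] using h),
              pv_set_set rv i _ _ h0 h]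
          ring_nf
        · rw [if_neg h3, if_neg h3, ih rv h]; ring_nf

-- A's outer loop is a per-index add of the signed count
lemma pv_outerA (moons : List Int) :
    ∀ (l : List (Int × Int)) (rv : List Int), (∀ p ∈ l, 0 ≤ p.1 ∧ p.1.toNat < rv.length) →
    l.foldl (fun returnVal im =>
      (PySem.List.enumerate moons).foldl (fun rv jx =>
        if im.1 == jx.1 then rv
        else if im.2 < jx.2 then PySem.List.pySetD rv im.1 (PySem.List.pyGetD rv im.1 0 + 1)
        else if jx.2 < im.2 then PySem.List.pySetD rv im.1 (PySem.List.pyGetD rv im.1 0 - 1)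
        else rv) returnVal) rv
    = l.foldl (fun rv im => PySem.List.pySetD rv im.1 (PySem.List.pyGetD rv im.1 0 +
        ((PySem.List.enumerate moons).map (fun jx => if im.1 == jx.1 then 0 else if im.2 < jx.2 then 1 else if jx.2 < im.2 then (-1 : Int) else 0)).sum)) rv := by
  intro l
  induction l with
  | nil => intro rv _; simp
  | cons im rest ih =>
    intro rv hran
    obtain ⟨h0, h⟩ := hran im (List.mem_cons_self)
    simp only [List.foldl_cons]
    rw [pv_innerA im.1 im.2 h0 _ rv h]
    exact ih _ (fun p hp => ⟨(hran p (List.mem_cons_of_mem _ hp)).1,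
      by simpa [PySem.List.length_pySetD] using (hran p (List.mem_cons_of_mem _ hp)).2⟩)

-- the signed count of a member of enumerate(moons) is pvDelta (the self-comparison A skips is 0 anyway)
lemma pv_cnt_eq_delta (moons : List Int) (im : Int × Int) (him : im ∈ PySem.List.enumerate moons) :
    ((PySem.List.enumerate moons).map (fun jx => if im.1 == jx.1 then 0 else if im.2 < jx.2 then 1 else if jx.2 < im.2 then (-1 : Int) else 0)).sum
    = pvDelta moons im.2 := by
  have hmap : ((PySem.List.enumerate moons).map (fun jx => if im.1 == jx.1 then 0 else if im.2 < jx.2 then 1 else if jx.2 < im.2 then (-1 : Int) else 0))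
      = ((PySem.List.enumerate moons).map (fun jx => (if im.2 < jx.2 then (1:Int) else 0) - (if jx.2 < im.2 then (1:Int) else 0))) := by
    apply List.map_congr_left
    intro jx hjx
    by_cases h1 : im.1 == jx.1
    · rw [PySem.List.mem_enumerate_iff] at him hjx
      obtain ⟨k, hk, hkim⟩ := him
      obtain ⟨k', hk', hkjx⟩ := hjx
      have hkk : k = k' := by
        have := beq_iff_eq.mp h1
        subst hkim hkjx
        simp at this; omega
      subst hkk
      have h2 : im.2 = jx.2 := by rw [hkim, hkjx]
      rw [if_pos h1, ← h2]
      simp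
    · rw [if_neg h1]
      by_cases h2 : im.2 < jx.2
      · simp [h2, not_lt.mpr (le_of_lt h2)]
      · by_cases h3 : jx.2 < im.2 <;> simp [h2, h3]
  rw [hmap]
  have hsplit : ((PySem.List.enumerate moons).map (fun jx => (if im.2 < jx.2 then (1:Int) else 0) - (if jx.2 < im.2 then (1:Int) else 0))).sum
      = ((PySem.List.enumerate moons).map (fun jx => if im.2 < jx.2 then (1:Int) else 0)).sum
        - ((PySem.List.enumerate moons).map (fun jx => if jx.2 < im.2 then (1:Int) else 0)).sum := by
    induction (PySem.List.enumerate moons) with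
    | nil => simp
    | cons x xs ih => simp only [List.map_cons, List.sum_cons, ih]; ring
  rw [hsplit]
  have e1 : ((PySem.List.enumerate moons).map (fun jx => if im.2 < jx.2 then (1:Int) else 0))
      = moons.map (fun x => if im.2 < x then (1:Int) else 0) := by
    rw [show (fun jx : Int × Int => if im.2 < jx.2 then (1:Int) else 0)
        = (fun x : Int => if im.2 < x then (1:Int) else 0) ∘ (fun jx : Int × Int => jx.2) from rfl,
      ← List.map_map, PySem.List.map_snd_enumerate]
  have e2 : ((PySem.List.enumerate moons).map (fun jx => if jx.2 < im.2 then (1:Int) else 0))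
      = moons.map (fun x => if x < im.2 then (1:Int) else 0) := by
    rw [show (fun jx : Int × Int => if jx.2 < im.2 then (1:Int) else 0)
        = (fun x : Int => if x < im.2 then (1:Int) else 0) ∘ (fun jx : Int × Int => jx.2) from rfl,
      ← List.map_map, PySem.List.map_snd_enumerate]
  rw [e1, e2]
  unfold pvDelta
  rw [← PySem.List.sum_map_ite_one_zero (fun x => decide (im.2 < x)) moons,
      ← PySem.List.sum_map_ite_one_zero (fun x => decide (x < im.2)) moons]
  simp

-- gt fold: keys not in the suffix are untouched
lemma pv_gt_pres (n v : Int) : ∀ (t : List Int) (a : Int) (d : PySem.Dict Int Int), v ∉ t →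
    ((PySem.List.enumerate t a).foldl (fun d iv => d.insert iv.2 (n - iv.1 - 1)) d).get? v = d.get? v := by
  intro t
  induction t with
  | nil => intro a d _; simp [PySem.List.enumerate_nil]
  | cons x rest ih =>
    intro a d hv
    rw [PySem.List.enumerate_cons]
    simp only [List.foldl_cons]
    rw [ih (a+1) _ (fun h => hv (List.mem_cons_of_mem _ h)),
        PySem.Dict.get?_insert_of_ne _ _ (by rintro rfl; exact hv List.mem_cons_self)]

-- gt fold on a sorted list stores n - a - #(≤ v)
lemma pv_gt_spec (n : Int) : ∀ (t : List Int) (a : Int) (d : PySem.Dict Int Int),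
    t.Pairwise (· ≤ ·) → ∀ v ∈ t,
    ((PySem.List.enumerate t a).foldl (fun d iv => d.insert iv.2 (n - iv.1 - 1)) d).get? v
    = some (n - a - (t.countP (fun x => x ≤ v) : Int)) := by
  intro t
  induction t with
  | nil => intro a d _ v hv; simp at hv
  | cons x rest ih =>
    intro a d hpw v hv
    have hx : ∀ y ∈ rest, x ≤ y := fun y hy => (List.pairwise_cons.mp hpw).1 y hy
    rw [PySem.List.enumerate_cons]
    simp only [List.foldl_cons]
    by_cases hvr : v ∈ rest
    · rw [ih (a+1) _ (List.pairwise_cons.mp hpw).2 v hvr]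
      have hxv : x ≤ v := hx v hvr
      rw [List.countP_cons]
      simp [hxv]
      ring
    · have hvx : v = x := by rcases List.mem_cons.mp hv with h | h; exact h; exact absurd h hvr
      subst hvx
      rw [pv_gt_pres n v rest (a+1) _ hvr, PySem.Dict.get?_insert_self]
      have hc : rest.countP (fun x => x ≤ v) = 0 := by
        rw [List.countP_eq_zero]
        intro y hy
        simp only [decide_eq_true_eq]
        intro hle
        exact hvr (le_antisymm hle (hx y hy) ▸ hy)
      rw [List.countP_cons]
      simp [hc]

-- lt fold: an existing binding survives (the fold never overwrites)
lemma pv_lt_pres (v w : Int) : ∀ (t : List Int) (a : Int) (d : PySem.Dict Int Int), d.get? v = some w →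
    ((PySem.List.enumerate t a).foldl (fun d iv => if d.contains iv.2 then d else d.insert iv.2 iv.1) d).get? v = some w := by
  intro t
  induction t with
  | nil => intro a d h; simpa [PySem.List.enumerate_nil] using h
  | cons x rest ih =>
    intro a d h
    rw [PySem.List.enumerate_cons]
    simp only [List.foldl_cons]
    apply ih
    by_cases hc : d.contains x
    · simpa [hc] using h
    · by_cases hvx : v = x
      · subst hvx
        rw [PySem.Dict.contains_eq_isSome_get?, h] at hc
        simp at hc
      · rw [if_neg (by simp [hc]), PySem.Dict.get?_insert_of_ne _ _ hvx, h]

-- lt fold on a sorted list stores a + #(< v)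
lemma pv_lt_spec : ∀ (t : List Int) (a : Int) (d : PySem.Dict Int Int),
    t.Pairwise (· ≤ ·) → ∀ v ∈ t, d.contains v = false →
    ((PySem.List.enumerate t a).foldl (fun d iv => if d.contains iv.2 then d else d.insert iv.2 iv.1) d).get? v
    = some (a + (t.countP (fun x => x < v) : Int)) := by
  intro t
  induction t with
  | nil => intro a d _ v hv; simp at hv
  | cons x rest ih =>
    intro a d hpw v hv hnc
    have hx : ∀ y ∈ rest, x ≤ y := fun y hy => (List.pairwise_cons.mp hpw).1 y hy
    rw [PySem.List.enumerate_cons]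
    simp only [List.foldl_cons]
    by_cases hvx : v = x
    · subst hvx
      rw [if_neg (by simp [hnc])]
      rw [pv_lt_pres v a rest (a+1) _ (PySem.Dict.get?_insert_self _ _ _)]
      have hc0 : rest.countP (fun y => y < v) = 0 := by
        rw [List.countP_eq_zero]
        intro y hy
        simp only [decide_eq_true_eq, not_lt]
        exact hx y hy
      rw [List.countP_cons]
      simp [hc0]
    · have hvr : v ∈ rest := by rcases List.mem_cons.mp hv with h | h; exact absurd h hvx; exact h
      have hxv : x < v := lt_of_le_of_ne (hx v hvr) (fun h => hvx (h.symm))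
      have step : ∀ d' : PySem.Dict Int Int, d'.contains v = false →
          ((PySem.List.enumerate rest (a+1)).foldl (fun d iv => if d.contains iv.2 then d else d.insert iv.2 iv.1) d').get? v
          = some ((a+1) + (rest.countP (fun x => x < v) : Int)) :=
        fun d' h' => ih (a+1) d' (List.pairwise_cons.mp hpw).2 v hvr h'
      by_cases hc : d.contains x
      · rw [if_pos hc, step d hnc, List.countP_cons]
        simp [hxv]; ring
      · rw [if_neg (by simp [hc]), step _ (by rw [PySem.Dict.contains_insert]; simp [hnc, hvx]),
            List.countP_cons]
        simp [hxv]; ring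

-- B's two dicts: gt[m] - lt[m] is pvDelta for every m in moons
lemma pv_dicts_delta (moons : List Int) (m : Int) (hm : m ∈ moons) :
    (let n : Int := moons.length
     let s := PySem.List.sorted moons (fun x => x) false
     let p := (PySem.List.enumerate s).foldl
       (fun (p : PySem.Dict Int Int × PySem.Dict Int Int) iv =>
         (if p.1.contains iv.2 then p.1 else p.1.insert iv.2 iv.1,
          p.2.insert iv.2 (n - iv.1 - 1)))
       (PySem.Dict.empty, PySem.Dict.empty)
     p.2.getD m 0 - p.1.getD m 0)
    = pvDelta moons m := by
  simp only []
  set n : Int := (moons.length : Int) with hn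
  set s := PySem.List.sorted moons (fun x => x) false with hs
  have key : (PySem.List.enumerate s).foldl
       (fun (p : PySem.Dict Int Int × PySem.Dict Int Int) iv =>
         (if p.1.contains iv.2 then p.1 else p.1.insert iv.2 iv.1,
          p.2.insert iv.2 (n - iv.1 - 1)))
       (PySem.Dict.empty, PySem.Dict.empty)
      = ((PySem.List.enumerate s).foldl (fun d iv => if d.contains iv.2 then d else d.insert iv.2 iv.1) PySem.Dict.empty,
         (PySem.List.enumerate s).foldl (fun d iv => d.insert iv.2 (n - iv.1 - 1)) PySem.Dict.empty) := by
    exact PySem.List.foldl_prod_mk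
      (f := fun (d : PySem.Dict Int Int) (iv : Int × Int) => if d.contains iv.2 = true then d else d.insert iv.2 iv.1)
      (g := fun (d : PySem.Dict Int Int) (iv : Int × Int) => d.insert iv.2 (n - iv.1 - 1)) _ _ _
  rw [key]
  simp only []
  have hpw : s.Pairwise (· ≤ ·) := by
    simpa using PySem.List.sorted_pairwise moons (fun x => x)
  have hms : m ∈ s := (PySem.List.mem_sorted _ _ _ _).mpr hm
  rw [PySem.Dict.getD_eq_get?_getD, PySem.Dict.getD_eq_get?_getD,
      pv_gt_spec n s 0 _ hpw m hms,
      pv_lt_spec s 0 _ hpw m hms (PySem.Dict.contains_empty m)]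
  have hperm : s.Perm moons := PySem.List.sorted_perm moons (fun x => x) false
  have hlen : s.length = moons.length := PySem.List.length_sorted moons (fun x => x) false
  have hcompl : s.countP (fun x => decide (x ≤ m)) + s.countP (fun x => decide (m < x)) = s.length := by
    rw [List.length_eq_countP_add_countP (fun x => decide (x ≤ m))]
    congr 1
    apply List.countP_congr
    intro y _
    simp
  have h1 : s.countP (fun x => decide (m < x)) = moons.countP (fun x => decide (m < x)) := hperm.countP_eq _
  have h2 : s.countP (fun x => decide (x < m)) = moons.countP (fun x => decide (x < m)) := hperm.countP_eq _
  simp only [Option.getD_some]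
  unfold pvDelta
  rw [← h1, ← h2]
  omega

-- ===== VERDICT (by name: the statement is the Claim_ definition above) =====
theorem calVelocity1D_spec : Claim_equal_calVelocity1D := by
  intro moons lv _ hpre
  unfold Pre_calVelocity1D at hpre
  unfold Spec_calVelocity1D calVelocity1D calVelocity1D_alt
  have hmem : ∀ p ∈ PySem.List.enumerate moons, 0 ≤ p.1 ∧ p.1.toNat < lv.length := by
    intro p hp
    rw [PySem.List.mem_enumerate_iff] at hp
    obtain ⟨k, hk, rfl⟩ := hp
    refine ⟨by simp, ?_⟩
    simp
    omega
  rw [pv_outerA moons (PySem.List.enumerate moons) lv hmem]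
  rw [PySem.List.foldl_congr_mem (PySem.List.enumerate moons) _
    (fun rv im => PySem.List.pySetD rv im.1 (PySem.List.pyGetD rv im.1 0 + pvDelta moons im.2)) lv
    (fun acc im him => by rw [pv_cnt_eq_delta moons im him])]
  refine (PySem.List.foldl_congr_mem (PySem.List.enumerate moons) _ _ lv ?_).symm
  intro acc im him
  have hm : im.2 ∈ moons := by
    rw [PySem.List.mem_enumerate_iff] at him
    obtain ⟨k, hk, rfl⟩ := him
    simp
  rw [pv_dicts_delta moons im.2 hm]
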